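-- pv_equiv track=rewrite | github.com/NikitaLoik/mRNADisplayResults_Analysis | utility_functions.py | dnas_appearances_by_cycle
-- ===== SOURCE A (Python) =====
-- def dnas_appearances_by_cycle(
--         base_cycle_sorted_dnas_list: list,
--         dnas_occurrences_by_cycle):
--     '''
--     which returns for each dna in selection a list of cycles in which this dna appears:
--     {dna_x:    [cycle_1, ..., cycle_N]}
--     '''
--     dnas_appearances_by_cycle = {}
--
--     for dna in base_cycle_sorted_dnas_list:
--         dnas_appearances_by_cycle[dna] = []
--         for cycle in dnas_occurrences_by_cycle:
--             if dna in dnas_occurrences_by_cycle[cycle]: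
--                 dnas_appearances_by_cycle[dna] += [cycle]
--     return dnas_appearances_by_cycle
-- ===== SOURCE B (Python) =====
-- def dnas_appearances_by_cycle(
--         base_cycle_sorted_dnas_list: list,
--         dnas_occurrences_by_cycle):
--     '''
--     which returns for each dna in selection a list of cycles in which this dna appears:
--     {dna_x:    [cycle_1, ..., cycle_N]}
--     '''
--     result = {dna: [] for dna in base_cycle_sorted_dnas_list}
--     for cycle, cycle_dnas in dnas_occurrences_by_cycle.items():
--         for dna in dict.fromkeys(cycle_dnas):
--             if dna in result:
--                 result[dna].append(cycle)
--     return result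
-- ===== Notes on version B (the rewrite author's own statement) =====
-- stated objective: faster
-- what changed: Inverts the loop nesting: instead of scanning every cycle (with a dict lookup and list membership test) once per selected dna, B pre-initializes result[dna]=[] for every selected dna and makes one pass over the cycles, distributing each cycle to the deduplicated dnas it contains.
import Mathlib
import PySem

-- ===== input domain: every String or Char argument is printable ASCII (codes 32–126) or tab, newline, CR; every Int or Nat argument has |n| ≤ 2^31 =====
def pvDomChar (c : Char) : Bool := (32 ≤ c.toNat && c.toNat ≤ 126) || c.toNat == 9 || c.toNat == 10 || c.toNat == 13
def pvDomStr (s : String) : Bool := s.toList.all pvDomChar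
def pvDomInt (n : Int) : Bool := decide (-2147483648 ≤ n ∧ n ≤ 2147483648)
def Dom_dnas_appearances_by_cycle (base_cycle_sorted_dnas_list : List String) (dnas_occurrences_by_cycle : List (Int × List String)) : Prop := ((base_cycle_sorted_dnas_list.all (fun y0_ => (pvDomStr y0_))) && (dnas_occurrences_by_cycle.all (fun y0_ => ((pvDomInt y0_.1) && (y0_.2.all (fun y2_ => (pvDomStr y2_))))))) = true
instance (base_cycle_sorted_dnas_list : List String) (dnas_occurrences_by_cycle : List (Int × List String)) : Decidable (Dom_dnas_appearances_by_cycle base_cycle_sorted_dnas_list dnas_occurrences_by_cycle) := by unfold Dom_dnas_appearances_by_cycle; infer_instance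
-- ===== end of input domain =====

-- B inverts A's loop nesting: one pass over the cycles distributing each cycle to the dnas it
-- contains, instead of scanning every cycle once per selected dna (objective: faster).

-- ===== PORT A =====
-- dict result; for dna in base: result[dna] = []; for cycle in occ (key iteration):
--   if dna in occ[cycle] (first-match lookup): result[dna] += [cycle]; return result (items).
def dnas_appearances_by_cycle (base_cycle_sorted_dnas_list : List String) (dnas_occurrences_by_cycle : List (Int × List String)) : List (String × List Int) :=
  (base_cycle_sorted_dnas_list.foldl (fun res dna =>
      dnas_occurrences_by_cycle.foldl (fun res cyc =>
          if ((PySem.Dict.mk dnas_occurrences_by_cycle).getD cyc.1 []).contains dna then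
            res.insert dna (res.getD dna [] ++ [cyc.1])
          else res)
        (res.insert dna []))
    PySem.Dict.empty).items

-- ===== PORT B =====
-- result = {dna: [] for dna in base}; for cycle, cycle_dnas in occ.items():
--   for dna in dict.fromkeys(cycle_dnas): if dna in result: result[dna].append(cycle).
def dnas_appearances_by_cycle_alt (base_cycle_sorted_dnas_list : List String) (dnas_occurrences_by_cycle : List (Int × List String)) : List (String × List Int) :=
  let init := base_cycle_sorted_dnas_list.foldl (fun d dna => d.insert dna ([] : List Int)) PySem.Dict.empty
  (dnas_occurrences_by_cycle.foldl (fun d cyc =>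
      (PySem.List.dedup cyc.2).foldl (fun d dna =>
          if d.contains dna then d.modify dna [] (· ++ [cyc.1]) else d)
        d)
    init).items

-- ===== PRECONDITION & SPEC =====
-- Pre_ excludes only association lists with duplicate cycle keys: those do not represent any
-- Python dict (A's argument is a dict), so A's first-match lookup behaviour there is an artefact
-- of the encoding, not of the Python program.
def Pre_dnas_appearances_by_cycle (base_cycle_sorted_dnas_list : List String) (dnas_occurrences_by_cycle : List (Int × List String)) : Prop :=
  (dnas_occurrences_by_cycle.map Prod.fst).Nodup
instance (base_cycle_sorted_dnas_list : List String) (dnas_occurrences_by_cycle : List (Int × List String)) : Decidable (Pre_dnas_appearances_by_cycle base_cycle_sorted_dnas_list dnas_occurrences_by_cycle) := by unfold Pre_dnas_appearances_by_cycle; infer_instance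

def pvWitness_dnas_appearances_by_cycle : List String × (List (Int × List String)) :=
  (["a", "b"], [(1, ["a"]), (2, ["b", "a", "b"]), (3, ["c"])])

def Spec_dnas_appearances_by_cycle (base_cycle_sorted_dnas_list : List String) (dnas_occurrences_by_cycle : List (Int × List String)) (out : List (String × List Int)) : Prop := out = dnas_appearances_by_cycle_alt base_cycle_sorted_dnas_list dnas_occurrences_by_cycle
instance (base_cycle_sorted_dnas_list : List String) (dnas_occurrences_by_cycle : List (Int × List String)) (out : List (String × List Int)) : Decidable (Spec_dnas_appearances_by_cycle base_cycle_sorted_dnas_list dnas_occurrences_by_cycle out) := by unfold Spec_dnas_appearances_by_cycle; infer_instance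

-- ===== CLAIM (what is proved, stated in full; the proofs are below) =====
def Claim_equal_dnas_appearances_by_cycle : Prop := ∀ (base_cycle_sorted_dnas_list : List String) (dnas_occurrences_by_cycle : List (Int × List String)), Dom_dnas_appearances_by_cycle base_cycle_sorted_dnas_list dnas_occurrences_by_cycle → Pre_dnas_appearances_by_cycle base_cycle_sorted_dnas_list dnas_occurrences_by_cycle → Spec_dnas_appearances_by_cycle base_cycle_sorted_dnas_list dnas_occurrences_by_cycle (dnas_appearances_by_cycle base_cycle_sorted_dnas_list dnas_occurrences_by_cycle)

-- ===== LEMMAS AND PROOFS =====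

-- the per-dna list of cycles both programs compute
def pvCycles (occ : List (Int × List String)) (dna : String) : List Int :=
  (occ.filter (fun c => c.2.contains dna)).map (·.1)

-- A's inner loop touches only the key `dna`
lemma pvA_inner (occ : List (Int × List String)) (cond : Int × List String → Bool)
    (res : PySem.Dict String (List Int)) (dna : String) (acc : List Int) :
    occ.foldl (fun r c => if cond c then r.insert dna (r.getD dna [] ++ [c.1]) else r)
      (res.insert dna acc)
    = res.insert dna (occ.foldl (fun a c => if cond c then a ++ [c.1] else a) acc) := by
  induction occ generalizing acc with
  | nil => rfl
  | cons c occ ih =>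
    simp only [List.foldl]
    by_cases h : cond c = true
    · rw [h, if_pos rfl, if_pos rfl, PySem.Dict.getD_insert_self, PySem.Dict.insert_insert_self, ih]
    · rw [if_neg (by simp [h]), if_neg (by simp [h]), ih]

-- first-match lookup of a member's key in a Nodup-key assoc list gives its own value
lemma pvLookup_self (occ : List (Int × List String)) (hnd : (occ.map Prod.fst).Nodup)
    (c : Int × List String) (hc : c ∈ occ) :
    (PySem.Dict.mk occ).getD c.1 [] = c.2 := by
  induction occ with
  | nil => cases hc
  | cons p occ ih =>
    rcases List.mem_cons.mp hc with h | h
    · subst h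
      obtain ⟨k, v⟩ := c
      simp [PySem.Dict.getD_eq_get?_getD, PySem.Dict.get?_mk_cons]
    · have hne : p.1 ≠ c.1 := by
        intro he
        have : c.1 ∈ occ.map Prod.fst := List.mem_map_of_mem h
        rw [← he] at this
        exact (List.nodup_cons.mp hnd).1 this
      rw [PySem.Dict.getD_eq_get?_getD, PySem.Dict.get?_mk_cons,
        if_neg (by simpa using hne), ← PySem.Dict.getD_eq_get?_getD]
      exact ih (List.nodup_cons.mp hnd).2 h

-- a fold of inserts with value depending only on the key
lemma pvGetD_foldl_insert (f : String → List Int) (base : List String)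
    (d : PySem.Dict String (List Int)) (dna : String) :
    (base.foldl (fun d x => d.insert x (f x)) d).getD dna []
    = if dna ∈ base then f dna else d.getD dna [] := by
  induction base generalizing d with
  | nil => simp
  | cons x xs ih =>
    simp only [List.foldl, ih, PySem.Dict.getD_insert, List.mem_cons]
    by_cases h1 : dna ∈ xs <;> by_cases h2 : dna = x <;> simp [h1, h2]

-- B's per-cycle inner loop: contains is unchanged
lemma pvB_contains (ys : List String) (c : Int) (d : PySem.Dict String (List Int)) (x : String) :
    (ys.foldl (fun d y => if d.contains y then d.modify y [] (· ++ [c]) else d) d).contains x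
    = d.contains x := by
  induction ys generalizing d with
  | nil => rfl
  | cons y ys ih =>
    simp only [List.foldl]
    by_cases h : d.contains y = true
    · rw [if_pos h, ih, PySem.Dict.contains_modify]
      by_cases hx : x = y <;> simp [hx, h]
    · rw [if_neg h, ih]

-- B's per-cycle inner loop: keys are unchanged
lemma pvB_keys (ys : List String) (c : Int) (d : PySem.Dict String (List Int)) :
    (ys.foldl (fun d y => if d.contains y then d.modify y [] (· ++ [c]) else d) d).keys
    = d.keys := by
  induction ys generalizing d with
  | nil => rfl
  | cons y ys ih =>
    simp only [List.foldl]
    by_cases h : d.contains y = true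
    · rw [if_pos h, ih, PySem.Dict.keys_modify]
      exact PySem.Dict.keys_insert_of_contains _ _ h
    · rw [if_neg h, ih]

-- B's per-cycle inner loop: effect on one key
lemma pvB_inner (ys : List String) (hys : ys.Nodup) (c : Int)
    (d : PySem.Dict String (List Int)) (dna : String) :
    (ys.foldl (fun d y => if d.contains y then d.modify y [] (· ++ [c]) else d) d).getD dna []
    = if dna ∈ ys ∧ d.contains dna = true then d.getD dna [] ++ [c] else d.getD dna [] := by
  induction ys generalizing d with
  | nil => simp
  | cons y ys ih =>
    obtain ⟨hy, hynd⟩ := List.nodup_cons.mp hys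
    simp only [List.foldl]
    by_cases h : d.contains y = true
    · rw [if_pos h, ih hynd]
      rw [PySem.Dict.contains_modify]
      by_cases hdy : dna = y
      · subst hdy
        have : dna ∉ ys := hy
        simp [this, h]
      · simp only [List.mem_cons, PySem.Dict.getD_modify, if_neg hdy]
        have : (dna == y || d.contains dna) = d.contains dna := by
          simp [hdy]
        rw [this]
        by_cases h1 : dna ∈ ys <;> simp [h1, hdy]
    · rw [if_neg h, ih hynd]
      by_cases hdy : dna = y
      · subst hdy
        simp [h, hy]
      · simp only [List.mem_cons]
        by_cases h1 : dna ∈ ys <;> simp [h1, hdy]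

-- B's outer loop: keys preserved
lemma pvB_outer_keys (occ : List (Int × List String)) (d : PySem.Dict String (List Int)) :
    (occ.foldl (fun d cyc => (PySem.List.dedup cyc.2).foldl
        (fun d dna => if d.contains dna then d.modify dna [] (· ++ [cyc.1]) else d) d) d).keys
    = d.keys := by
  induction occ generalizing d with
  | nil => rfl
  | cons c occ ih => simp only [List.foldl]; rw [ih, pvB_keys]

-- B's outer loop: effect on one key
lemma pvB_outer (occ : List (Int × List String)) (d : PySem.Dict String (List Int)) (dna : String) :
    (occ.foldl (fun d cyc => (PySem.List.dedup cyc.2).foldl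
        (fun d dna => if d.contains dna then d.modify dna [] (· ++ [cyc.1]) else d) d) d).getD dna []
    = if d.contains dna = true then d.getD dna [] ++ pvCycles occ dna else d.getD dna [] := by
  induction occ generalizing d with
  | nil => by_cases h : d.contains dna = true <;> simp [pvCycles, h]
  | cons c occ ih =>
    simp only [List.foldl]
    rw [ih, pvB_contains, pvB_inner _ (PySem.List.nodup_dedup c.2)]
    have hmem : dna ∈ PySem.List.dedup c.2 ↔ c.2.contains dna = true := by
      rw [PySem.List.mem_dedup]; simp
    by_cases hd : d.contains dna = true
    · by_cases hc : c.2.contains dna = true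
      · have hc' : dna ∈ c.2 := by simpa using hc
        simp [pvCycles, hd, hc']
      · have hc' : dna ∉ c.2 := by simpa using hc
        simp [pvCycles, hd, hc']
    · simp [hd]

-- ===== VERDICT (by name: the statement is the Claim_ definition above) =====
theorem dnas_appearances_by_cycle_spec : Claim_equal_dnas_appearances_by_cycle := by
  intro base occ _hdom hpre
  unfold Spec_dnas_appearances_by_cycle dnas_appearances_by_cycle dnas_appearances_by_cycle_alt
  -- rewrite A's body: inner loop = insert of the accumulated cycle list
  have hA : ∀ (res : PySem.Dict String (List Int)) (dna : String),
      occ.foldl (fun res cyc =>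
          if ((PySem.Dict.mk occ).getD cyc.1 []).contains dna then
            res.insert dna (res.getD dna [] ++ [cyc.1])
          else res) (res.insert dna [])
      = res.insert dna (pvCycles occ dna) := by
    intro res dna
    rw [pvA_inner occ (fun c => ((PySem.Dict.mk occ).getD c.1 []).contains dna) res dna []]
    congr 1
    have hcong : occ.foldl (fun a c => if ((PySem.Dict.mk occ).getD c.1 []).contains dna then a ++ [c.1] else a) []
        = occ.foldl (fun a c => if c.2.contains dna then a ++ [c.1] else a) [] := by
      apply PySem.List.foldl_congr_mem
      intro a c hc
      rw [pvLookup_self occ hpre c hc]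
    rw [hcong, PySem.List.foldl_append_if (fun c : Int × List String => c.2.contains dna)
      (fun c : Int × List String => c.1)]
    simp [pvCycles]
  have hAfold : base.foldl (fun res dna =>
        occ.foldl (fun res cyc =>
            if ((PySem.Dict.mk occ).getD cyc.1 []).contains dna then
              res.insert dna (res.getD dna [] ++ [cyc.1])
            else res) (res.insert dna []))
      PySem.Dict.empty
      = base.foldl (fun res dna => res.insert dna (pvCycles occ dna)) PySem.Dict.empty := by
    apply PySem.List.foldl_congr_mem
    intro res dna _
    exact hA res dna
  rw [hAfold]
  -- both sides as keys.map (k, getD k)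
  set dA := base.foldl (fun res dna => res.insert dna (pvCycles occ dna)) PySem.Dict.empty with hdA
  set dInit := base.foldl (fun d dna => d.insert dna ([] : List Int)) PySem.Dict.empty with hdInit
  set dB := occ.foldl (fun d cyc => (PySem.List.dedup cyc.2).foldl
      (fun d dna => if d.contains dna then d.modify dna [] (· ++ [cyc.1]) else d) d) dInit with hdB
  have hkA : dA.keys = PySem.Set.ofList base := by
    rw [hdA, PySem.Dict.keys_foldl_insert]
    simp [PySem.Dict.keys_empty, PySem.Set.update_nil_left]
  have hkInit : dInit.keys = PySem.Set.ofList base := by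
    rw [hdInit, PySem.Dict.keys_foldl_insert]
    simp [PySem.Dict.keys_empty, PySem.Set.update_nil_left]
  have hkB : dB.keys = PySem.Set.ofList base := by rw [hdB, pvB_outer_keys, hkInit]
  have hndA : dA.keys.Nodup := by rw [hkA]; exact PySem.Set.nodup_ofList base
  have hndB : dB.keys.Nodup := by rw [hkB]; exact PySem.Set.nodup_ofList base
  rw [PySem.Dict.items_eq_map_keys dA hndA [], PySem.Dict.items_eq_map_keys dB hndB [], hkA, hkB]
  apply List.map_congr_left
  intro dna hdna
  have hmem : dna ∈ base := (PySem.Set.mem_ofList _ _).mp hdna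
  have hcInit : dInit.contains dna = true := by
    rw [PySem.Dict.contains_iff_mem_keys, hkInit]
    exact hdna
  have hgInit : dInit.getD dna [] = [] := by
    rw [hdInit, pvGetD_foldl_insert (fun _ => ([] : List Int)) base PySem.Dict.empty dna]
    simp [hmem]
  have hB : dB.getD dna [] = pvCycles occ dna := by
    rw [hdB, pvB_outer, if_pos hcInit, hgInit]
    simp
  have hA' : dA.getD dna [] = pvCycles occ dna := by
    rw [hdA, pvGetD_foldl_insert (fun x => pvCycles occ x) base PySem.Dict.empty dna, if_pos hmem]
  rw [hA', hB]
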